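-- pv_equiv track=rewrite | github.com/syliou/job-helper | job_helper.py | display_transferable_skills
-- ===== SOURCE A (Python) =====
-- def clean_keyword(keyword):
--     """Normalize a keyword so comparisons are consistent."""
--     return keyword.strip().lower()
--
-- TRANSFERABLE_DISPLAY_OVERLAPS = [
--     {"data interpretation", "data analysis"},
--     {"treatment performance", "treatment performance evaluation"},
-- ]
--
-- def display_transferable_skills(skills, limit=3):
--     """Return a concise, display-only list of transferable skills."""
--     selected = []
--     seen = set()
--
--     for skill in skills:
--         normalized = clean_keyword(skill)
--         if normalized in seen:
--             continue
--         if any(normalized in group and any(clean_keyword(item) in group for item in selected) for group in TRANSFERABLE_DISPLAY_OVERLAPS):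
--             continue
--
--         selected.append(skill)
--         seen.add(normalized)
--
--         if len(selected) == limit:
--             break
--
--     return selected
-- ===== SOURCE B (Python) =====
-- def clean_keyword(keyword):
--     """Normalize a keyword so comparisons are consistent."""
--     return keyword.strip().lower()
--
-- TRANSFERABLE_DISPLAY_OVERLAPS = [
--     {"data interpretation", "data analysis"},
--     {"treatment performance", "treatment performance evaluation"},
-- ]
--
-- # Index built once: normalized keyword -> set of overlap-group indices it belongs to.
-- _GROUPS_BY_KEYWORD = {}
-- for _i, _group in enumerate(TRANSFERABLE_DISPLAY_OVERLAPS):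
--     for _kw in _group:
--         _GROUPS_BY_KEYWORD.setdefault(_kw, set()).add(_i)
--
-- def display_transferable_skills(skills, limit=3):
--     """Return a concise, display-only list of transferable skills.
--
--     Instead of rescanning `selected` against every overlap group, keep a set
--     `covered` of group indices already represented in the output and look each
--     keyword's groups up in a prebuilt index.
--     """
--     selected = []
--     seen = set()
--     covered = set()
--     for skill in skills:
--         normalized = clean_keyword(skill)
--         if normalized in seen:
--             continue
--         groups = _GROUPS_BY_KEYWORD.get(normalized, set())
--         if groups & covered:
--             continue
--         selected.append(skill)
--         seen.add(normalized)
--         covered |= groups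
--         if len(selected) == limit:
--             break
--     return selected
-- ===== Notes on version B (the rewrite author's own statement) =====
-- stated objective: alternative
-- what changed: B looks each keyword's overlap-group indices up in a dict index built once at module load and maintains an incrementally updated set of covered group indices, instead of rescanning the whole `selected` list against every overlap group on each iteration.
import Mathlib
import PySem

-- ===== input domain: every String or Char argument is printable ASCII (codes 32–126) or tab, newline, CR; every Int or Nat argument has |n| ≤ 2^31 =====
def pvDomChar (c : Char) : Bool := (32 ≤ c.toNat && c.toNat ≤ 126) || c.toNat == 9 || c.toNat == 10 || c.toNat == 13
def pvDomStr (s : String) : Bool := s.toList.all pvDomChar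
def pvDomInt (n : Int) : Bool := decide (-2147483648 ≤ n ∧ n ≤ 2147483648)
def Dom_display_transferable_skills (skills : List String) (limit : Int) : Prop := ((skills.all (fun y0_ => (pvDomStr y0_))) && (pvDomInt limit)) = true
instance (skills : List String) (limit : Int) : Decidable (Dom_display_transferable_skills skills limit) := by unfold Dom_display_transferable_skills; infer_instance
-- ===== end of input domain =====

-- B replaces A's inner rescan of `selected` by an incrementally maintained set of
-- covered overlap-group indices; return values are proved identical (objective: alternative).

-- ===== PORT A =====
-- clean_keyword(keyword) = keyword.strip().lower()
def clean_keyword (keyword : String) : String := PySem.Str.lower (PySem.Str.strip keyword)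

def TRANSFERABLE_DISPLAY_OVERLAPS : List (PySem.Set String) :=
  [PySem.Set.ofList ["data interpretation", "data analysis"],
   PySem.Set.ofList ["treatment performance", "treatment performance evaluation"]]

-- the for-loop of A: state (selected, seen)
def dtsLoopA (limit : Int) : List String → List String → PySem.Set String → List String
  | [], selected, _ => selected
  | skill :: rest, selected, seen =>
    let normalized := clean_keyword skill
    if PySem.Set.contains seen normalized then
      dtsLoopA limit rest selected seen
    else if TRANSFERABLE_DISPLAY_OVERLAPS.any (fun group =>
        PySem.Set.contains group normalized &&
        selected.any (fun item => PySem.Set.contains group (clean_keyword item))) then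
      dtsLoopA limit rest selected seen
    else
      let selected' := selected ++ [skill]
      let seen' := PySem.Set.add seen normalized
      if (selected'.length : Int) = limit then selected'
      else dtsLoopA limit rest selected' seen'

def display_transferable_skills (skills : List String) (limit : Int) : List String :=
  dtsLoopA limit skills [] PySem.Set.empty

-- ===== PORT B =====
-- module-level index: _GROUPS_BY_KEYWORD.setdefault(_kw, set()).add(_i) over enumerate(TRANSFERABLE_DISPLAY_OVERLAPS).
-- (The inner `for _kw in _group` iterates a Python set; that order only affects the key-insertion
-- order of this lookup-only index, never a lookup's value, so iterating the Set's list order is exact.)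
def dtsGroupsByKeyword : PySem.Dict String (PySem.Set Int) :=
  (PySem.List.enumerate TRANSFERABLE_DISPLAY_OVERLAPS 0).foldl
    (fun d p => p.2.foldl
      (fun d kw => PySem.Dict.modify d kw PySem.Set.empty (fun s => PySem.Set.add s p.1)) d)
    PySem.Dict.empty

-- the for-loop of B: state (selected, seen, covered)
def dtsLoopB (limit : Int) : List String → List String → PySem.Set String → PySem.Set Int → List String
  | [], selected, _, _ => selected
  | skill :: rest, selected, seen, covered =>
    let normalized := clean_keyword skill
    if PySem.Set.contains seen normalized then
      dtsLoopB limit rest selected seen covered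
    else
      let groups := PySem.Dict.getD dtsGroupsByKeyword normalized PySem.Set.empty
      if !(PySem.Set.inter groups covered).isEmpty then
        dtsLoopB limit rest selected seen covered
      else
        let selected' := selected ++ [skill]
        let seen' := PySem.Set.add seen normalized
        let covered' := PySem.Set.union covered groups
        if (selected'.length : Int) = limit then selected'
        else dtsLoopB limit rest selected' seen' covered'

def display_transferable_skills_alt (skills : List String) (limit : Int) : List String :=
  dtsLoopB limit skills [] PySem.Set.empty PySem.Set.empty

-- ===== PRECONDITION & SPEC =====
def Spec_display_transferable_skills (skills : List String) (limit : Int) (out : List String) : Prop := out = display_transferable_skills_alt skills limit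
instance (skills : List String) (limit : Int) (out : List String) : Decidable (Spec_display_transferable_skills skills limit out) := by unfold Spec_display_transferable_skills; infer_instance

-- ===== CLAIM (what is proved, stated in full; the proofs are below) =====
def Claim_equal_display_transferable_skills : Prop := ∀ (skills : List String) (limit : Int), Dom_display_transferable_skills skills limit → Spec_display_transferable_skills skills limit (display_transferable_skills skills limit)

-- ===== LEMMAS AND PROOFS =====

def dtsG0 : PySem.Set String := PySem.Set.ofList ["data interpretation", "data analysis"]
def dtsG1 : PySem.Set String := PySem.Set.ofList ["treatment performance", "treatment performance evaluation"]

-- a group is "hit" when some selected item normalizes into it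
def dtsHit (g : PySem.Set String) (selected : List String) : Bool :=
  selected.any (fun item => PySem.Set.contains g (clean_keyword item))

-- loop invariant: covered holds exactly the indices of hit groups
def dtsInv (covered : PySem.Set Int) (selected : List String) : Prop :=
  ∀ i : Int, i ∈ covered ↔ ((i = 0 ∧ dtsHit dtsG0 selected = true) ∨ (i = 1 ∧ dtsHit dtsG1 selected = true))

theorem dts_mem_groupsOf (n : String) (i : Int) :
    i ∈ PySem.Dict.getD dtsGroupsByKeyword n PySem.Set.empty ↔
      ((i = 0 ∧ PySem.Set.contains dtsG0 n = true) ∨ (i = 1 ∧ PySem.Set.contains dtsG1 n = true)) := by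
  have hd : dtsGroupsByKeyword = PySem.Dict.mk
      [("data interpretation", [0]), ("data analysis", [0]),
       ("treatment performance", [1]), ("treatment performance evaluation", [1])] := by decide
  have hg0 : dtsG0 = ["data interpretation", "data analysis"] := by decide
  have hg1 : dtsG1 = ["treatment performance", "treatment performance evaluation"] := by decide
  have hc0 : ∀ m : String, PySem.Set.contains dtsG0 m =
      (m == "data interpretation" || m == "data analysis") := by
    intro m; rw [PySem.Set.contains_eq_listContains, hg0]; simp [Bool.beq_eq_decide_eq]
  have hc1 : ∀ m : String, PySem.Set.contains dtsG1 m =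
      (m == "treatment performance" || m == "treatment performance evaluation") := by
    intro m; rw [PySem.Set.contains_eq_listContains, hg1]; simp [Bool.beq_eq_decide_eq]
  rw [hd, PySem.Dict.getD_eq_get?_getD, hc0, hc1]
  by_cases h1 : n = "data interpretation"
  · subst h1; simp [PySem.Dict.get?_mk_cons]
  by_cases h2 : n = "data analysis"
  · subst h2; simp [PySem.Dict.get?_mk_cons]
  by_cases h3 : n = "treatment performance"
  · subst h3; simp [PySem.Dict.get?_mk_cons]
  by_cases h4 : n = "treatment performance evaluation"
  · subst h4; simp [PySem.Dict.get?_mk_cons]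
  · have hnone : (PySem.Dict.mk ([] : List (String × PySem.Set Int))).get? n = none := rfl
    simp [PySem.Dict.get?_mk_cons, PySem.Set.empty, beq_iff_eq, hnone,
      Ne.symm h1, Ne.symm h2, Ne.symm h3, Ne.symm h4, h1, h2, h3, h4]

theorem dts_inter_empty_iff {α : Type} [BEq α] [LawfulBEq α] (s t : PySem.Set α) :
    ((PySem.Set.inter s t).isEmpty = true) ↔ ∀ x, ¬ (x ∈ s ∧ x ∈ t) := by
  rw [List.isEmpty_iff, List.eq_nil_iff_forall_not_mem]
  constructor
  · intro h x hx
    exact h x ((PySem.Set.mem_inter s t x).2 hx)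
  · intro h x hx
    exact h x ((PySem.Set.mem_inter s t x).1 hx)

theorem dtsHit_append (g : PySem.Set String) (selected : List String) (skill : String) :
    dtsHit g (selected ++ [skill]) = (dtsHit g selected || PySem.Set.contains g (clean_keyword skill)) := by
  simp [dtsHit]

theorem dts_loop_eq (limit : Int) (skills : List String) :
    ∀ (selected : List String) (seen : PySem.Set String) (covered : PySem.Set Int),
    dtsInv covered selected →
    dtsLoopA limit skills selected seen = dtsLoopB limit skills selected seen covered := by
  induction skills with
  | nil => intro selected seen covered _; rfl
  | cons skill rest ih =>
    intro selected seen covered hinv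
    rw [dtsLoopA, dtsLoopB]
    by_cases hseen : PySem.Set.contains seen (clean_keyword skill) = true
    · simp only [hseen, if_pos]
      exact ih selected seen covered hinv
    · simp only [Bool.not_eq_true] at hseen
      simp only [hseen, Bool.false_eq_true, if_false]
      -- the two skip conditions agree
      have hcond :
          (TRANSFERABLE_DISPLAY_OVERLAPS.any (fun group =>
            PySem.Set.contains group (clean_keyword skill) &&
            selected.any (fun item => PySem.Set.contains group (clean_keyword item))) = true)
          ↔ (!(PySem.Set.inter (PySem.Dict.getD dtsGroupsByKeyword (clean_keyword skill) PySem.Set.empty) covered).isEmpty) = true := by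
        rw [Bool.not_eq_true', ← Bool.not_eq_true, dts_inter_empty_iff]
        simp only [TRANSFERABLE_DISPLAY_OVERLAPS, List.any_cons, List.any_nil, Bool.or_false,
          Bool.or_eq_true, Bool.and_eq_true]
        constructor
        · rintro (⟨hc, hh⟩ | ⟨hc, hh⟩)
          · intro h
            have hg : (0 : Int) ∈ PySem.Dict.getD dtsGroupsByKeyword (clean_keyword skill) PySem.Set.empty :=
              (dts_mem_groupsOf _ 0).2 (Or.inl ⟨rfl, hc⟩)
            have hcv : (0 : Int) ∈ covered := (hinv 0).2 (Or.inl ⟨rfl, hh⟩)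
            exact h 0 ⟨hg, hcv⟩
          · intro h
            have hg : (1 : Int) ∈ PySem.Dict.getD dtsGroupsByKeyword (clean_keyword skill) PySem.Set.empty :=
              (dts_mem_groupsOf _ 1).2 (Or.inr ⟨rfl, hc⟩)
            have hcv : (1 : Int) ∈ covered := (hinv 1).2 (Or.inr ⟨rfl, hh⟩)
            exact h 1 ⟨hg, hcv⟩
        · intro h
          by_contra hno
          apply h
          intro x hx
          obtain ⟨hxg, hxc⟩ := hx
          rcases (dts_mem_groupsOf _ x).1 hxg with ⟨hx0, hc⟩ | ⟨hx1, hc⟩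
          · subst hx0
            rcases (hinv 0).1 hxc with ⟨_, hh⟩ | ⟨h01, _⟩
            · exact hno (Or.inl ⟨hc, hh⟩)
            · exact absurd h01 (by norm_num)
          · subst hx1
            rcases (hinv 1).1 hxc with ⟨h10, _⟩ | ⟨_, hh⟩
            · exact absurd h10 (by norm_num)
            · exact hno (Or.inr ⟨hc, hh⟩)
      by_cases hskip : (TRANSFERABLE_DISPLAY_OVERLAPS.any (fun group =>
          PySem.Set.contains group (clean_keyword skill) &&
          selected.any (fun item => PySem.Set.contains group (clean_keyword item))) = true)
      · simp only [hskip, if_pos, (hcond.1 hskip), if_pos]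
        exact ih selected seen covered hinv
      · have hB : (!(PySem.Set.inter (PySem.Dict.getD dtsGroupsByKeyword (clean_keyword skill) PySem.Set.empty) covered).isEmpty) = false := by
          rw [← Bool.not_eq_true]; exact fun h => hskip (hcond.2 h)
        simp only [Bool.not_eq_true] at hskip
        simp only [hskip, hB, Bool.false_eq_true, if_false]
        split_ifs with hlim
        · rfl
        · apply ih
          intro i
          rw [PySem.Set.mem_union, hinv i, dts_mem_groupsOf, dtsHit_append, dtsHit_append]
          simp only [Bool.or_eq_true]
          constructor
          · rintro ((⟨rfl, h⟩ | ⟨rfl, h⟩) | (⟨rfl, h⟩ | ⟨rfl, h⟩))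
            · exact Or.inl ⟨rfl, Or.inl h⟩
            · exact Or.inr ⟨rfl, Or.inl h⟩
            · exact Or.inl ⟨rfl, Or.inr h⟩
            · exact Or.inr ⟨rfl, Or.inr h⟩
          · rintro (⟨rfl, h | h⟩ | ⟨rfl, h | h⟩)
            · exact Or.inl (Or.inl ⟨rfl, h⟩)
            · exact Or.inr (Or.inl ⟨rfl, h⟩)
            · exact Or.inl (Or.inr ⟨rfl, h⟩)
            · exact Or.inr (Or.inr ⟨rfl, h⟩)

theorem dtsInv_empty : dtsInv PySem.Set.empty [] := by
  intro i
  simp [PySem.Set.empty, dtsHit]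

-- ===== VERDICT (by name: the statement is the Claim_ definition above) =====
theorem display_transferable_skills_spec : Claim_equal_display_transferable_skills := by
  intro skills limit _
  unfold Spec_display_transferable_skills display_transferable_skills display_transferable_skills_alt
  exact dts_loop_eq limit skills [] PySem.Set.empty PySem.Set.empty dtsInv_empty
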